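-- pv_equiv track=rewrite | github.com/MrBrantCode/unitest_baseline | mut_generate/mist_train_taco/taco_2817/solution.py | count_special_matrix_rows
-- ===== SOURCE A (Python) =====
-- def count_special_matrix_rows(n, t):
--     """
--     Counts the number of numbers m (1 ≤ m ≤ n) such that the sum of values in the cells in the row number m + 1 of the resulting matrix equals t.
--
--     Parameters:
--     n (int): The upper limit for m (1 ≤ m ≤ n).
--     t (int): The target sum for the row.
--
--     Returns:
--     int: The count of numbers m that satisfy the condition.
--     """
--
--     def comb(n, r):
--         if r > n or r < 0:
--             return 0
--         r = min(r, n - r)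
--         result = 1
--         for i in range(1, r + 1):
--             result = result * (n + 1 - i) // i
--         return result
--
--     def F(n, t):
--         if t == 0:
--             return 1
--         elif n == 0:
--             return 0
--         elif n == 1:
--             return int(t == 1)
--         m = len(bin(n)) - 3
--         return F(n - (1 << m), t - 1) + comb(m, t)
--
--     T = len(bin(t)) - 3
--     if 1 << T != t:
--         return 0
--     else:
--         return F(n + 1, T + 1) - int(t == 1)
-- ===== SOURCE B (Python) =====
-- def count_special_matrix_rows(n, t):
--     """Table-driven digit DP: one descending pass over the bit positions of n+1
--     using a precomputed Pascal triangle, instead of A's bit-stripping recursion.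
--     For negative n it returns 0 (no rows m with 1 <= m <= n exist)."""
--     if t <= 0 or t != 1 << (t.bit_length() - 1):
--         return 0
--     if n < 0:
--         return 0
--     k = t.bit_length()
--     N = n + 1
--     L = N.bit_length()
--     tri = [[1]]
--     for i in range(1, L):
--         prev = tri[-1]
--         tri.append([1] + [prev[j] + prev[j + 1] for j in range(i - 1)] + [1])
--     total = 0
--     ones = 0
--     for i in range(L - 1, -1, -1):
--         if (N >> i) & 1:
--             r = k - ones
--             if 0 <= r <= i:
--                 total += tri[i][r]
--             ones += 1
--     if ones == k:
--         total += 1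
--     return total - (1 if t == 1 else 0)
-- ===== Notes on version B (the rewrite author's own statement) =====
-- stated objective: alternative
-- what changed: A's bit-stripping recursion F(n-2^m, t-1) with a per-call multiplicative comb is replaced by a single descending pass over the bit positions of n+1 that threads a ones-counter and reads binomials from a Pascal triangle built once up front.
-- intended difference: For t a positive power of two and negative n (n <= -2, or n = -1 with t = 1), A runs its bit recursion on a nonpositive upper bound and returns a meaningless value (a positive count for n <= -2, and -1 for n = -1, t = 1), while B returns 0, the intended count of rows m with 1 <= m <= n when no such m exists. — e.g. on count_special_matrix_rows(-2, 1): A returns 1, B returns 0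
import Mathlib
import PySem

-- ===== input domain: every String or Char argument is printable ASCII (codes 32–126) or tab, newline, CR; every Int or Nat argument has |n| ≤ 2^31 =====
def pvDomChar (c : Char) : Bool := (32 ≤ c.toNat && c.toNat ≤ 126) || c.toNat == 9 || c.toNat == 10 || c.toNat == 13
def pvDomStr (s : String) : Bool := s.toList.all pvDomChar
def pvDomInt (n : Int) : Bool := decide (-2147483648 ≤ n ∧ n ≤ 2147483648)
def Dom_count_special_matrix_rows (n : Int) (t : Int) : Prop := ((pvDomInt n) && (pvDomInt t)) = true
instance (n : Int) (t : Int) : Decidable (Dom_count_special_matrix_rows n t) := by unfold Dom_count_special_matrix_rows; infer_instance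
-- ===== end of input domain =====

-- B replaces A's bit-stripping recursion F(n-2^m, t-1) by a single descending pass over
-- the bit positions of n+1 with a Pascal triangle built once up front (objective:
-- alternative decomposition, same cost). For t a positive power of two and negative n,
-- A returns a meaningless value (positive for n ≤ -2, and -1 at n = -1, t = 1) while B
-- returns 0, the intended count of rows m with 1 ≤ m ≤ n when no such m exists (see D_).


-- ===== PORT A =====

-- `for i in range(1, r+1): result = result * (n + 1 - i) // i`
def pvCombLoopA (n : Int) (i : Int) (r : Int) (result : Int) : Int :=
  if _h : i ≤ r then
    pvCombLoopA n (i + 1) r (PySem.Int.floordiv (result * (n + 1 - i)) i)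
  else result
termination_by (r + 1 - i).toNat
decreasing_by omega

-- A's comb helper
def pvCombA (n : Int) (r : Int) : Int :=
  if r > n ∨ r < 0 then 0
  else pvCombLoopA n 1 (min r (n - r)) 1

-- len(bin(x)) - 3, exact for every int ('0b'/'-0b' prefix accounting)
def pyBinLenSub3 (x : Int) : Int :=
  if 0 < x then (PySem.Int.bitLength x : Int) - 1
  else if x = 0 then 0
  else (PySem.Int.bitLength x : Int)

-- A's recursive F.  The recursive branch is reached only with t ≥ 1 (the entry point
-- calls F with t = T+1 ≥ 1 and t counts down to the t == 0 base case), so the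
-- `t < 0` branch is a pure totality guard, never reached from the entry point.
def pvF (n : Int) (t : Int) : Int :=
  if t = 0 then 1
  else if n = 0 then 0
  else if n = 1 then (if t = 1 then 1 else 0)
  else if _h : t < 0 then 0
  else
    pvF (n - ((1 : Int) <<< (pyBinLenSub3 n).toNat)) (t - 1) + pvCombA (pyBinLenSub3 n) t
termination_by t.toNat
decreasing_by omega

def count_special_matrix_rows (n : Int) (t : Int) : Int :=
  if ((1 : Int) <<< (pyBinLenSub3 t).toNat) ≠ t then 0
  else pvF (n + 1) (pyBinLenSub3 t + 1) - (if t = 1 then 1 else 0)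

-- ===== PORT B =====

-- `[1] + [prev[j] + prev[j+1] for j in range(i-1)] + [1]`
def pvPascalRow (prev : List Int) (i : Nat) : List Int :=
  1 :: (((List.range (i - 1)).map (fun j => prev.getD j 0 + prev.getD (j + 1) 0)) ++ [1])

-- `tri = [[1]]; for i in range(1, L): tri.append(...)`
def pvTri (L : Nat) : List (List Int) :=
  ((List.range L).drop 1).foldl (fun tri i => tri ++ [pvPascalRow (tri.getLastD []) i]) [[1]]

-- the descending scan `for i in range(L-1, -1, -1)` threading (total, ones);
-- `(N >> i) & 1` is Int.land (N >>> i) 1 (exact Python shift/and semantics)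
def pvScan (N : Int) (k : Int) (tri : List (List Int)) : List Nat → Int × Int → Int × Int
  | [], st => st
  | i :: rest, st =>
      if Int.land (N >>> i) 1 = 1 then
        pvScan N k tri rest
          (st.1 + (if 0 ≤ k - st.2 ∧ k - st.2 ≤ (i : Int)
                   then (tri.getD i []).getD (k - st.2).toNat 0 else 0),
           st.2 + 1)
      else pvScan N k tri rest st

def count_special_matrix_rows_alt (n : Int) (t : Int) : Int :=
  if t ≤ 0 ∨ t ≠ (1 : Int) <<< (PySem.Int.bitLength t - 1) then 0
  else if n < 0 then 0
  else
    let k : Int := (PySem.Int.bitLength t : Int)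
    let N : Int := n + 1
    let L : Nat := PySem.Int.bitLength N
    let st := pvScan N k (pvTri L) (List.range L).reverse (0, 0)
    (st.1 + (if st.2 = k then 1 else 0)) - (if t = 1 then 1 else 0)

-- ===== PRECONDITION & SPEC =====
-- For t a positive power of two and negative n (n ≤ -2, or n = -1 with t = 1), A runs
-- its bit recursion on a nonpositive upper bound and returns a meaningless value (a
-- positive count for n ≤ -2, and -1 for n = -1, t = 1), while B returns 0, the intended
-- count of rows m with 1 ≤ m ≤ n when no such m exists.
def D_count_special_matrix_rows (n : Int) (t : Int) : Prop :=
  (0 < t ∧ t = (1 : Int) <<< (PySem.Int.bitLength t - 1)) ∧ (n ≤ -2 ∨ (n = -1 ∧ t = 1))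
instance (n : Int) (t : Int) : Decidable (D_count_special_matrix_rows n t) := by
  unfold D_count_special_matrix_rows; infer_instance

def Spec_count_special_matrix_rows (n : Int) (t : Int) (out : Int) : Prop :=
  ¬ D_count_special_matrix_rows n t → out = count_special_matrix_rows_alt n t
instance (n : Int) (t : Int) (out : Int) : Decidable (Spec_count_special_matrix_rows n t out) := by unfold Spec_count_special_matrix_rows; infer_instance

def pvDiffWitness_count_special_matrix_rows : Int × Int := (-2, 1)
def pvDiffWitnessOut_count_special_matrix_rows : Int × Int := (1, 0)

-- ===== CLAIM (what is proved, stated in full; the proofs are below) =====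
def Claim_unchanged_count_special_matrix_rows : Prop := ∀ (n : Int) (t : Int), Dom_count_special_matrix_rows n t → Spec_count_special_matrix_rows n t (count_special_matrix_rows n t)
def Claim_changed_count_special_matrix_rows : Prop := Dom_count_special_matrix_rows (pvDiffWitness_count_special_matrix_rows.1) (pvDiffWitness_count_special_matrix_rows.2) ∧ D_count_special_matrix_rows (pvDiffWitness_count_special_matrix_rows.1) (pvDiffWitness_count_special_matrix_rows.2) ∧ count_special_matrix_rows (pvDiffWitness_count_special_matrix_rows.1) (pvDiffWitness_count_special_matrix_rows.2) = pvDiffWitnessOut_count_special_matrix_rows.1 ∧ count_special_matrix_rows_alt (pvDiffWitness_count_special_matrix_rows.1) (pvDiffWitness_count_special_matrix_rows.2) = pvDiffWitnessOut_count_special_matrix_rows.2 ∧ pvDiffWitnessOut_count_special_matrix_rows.1 ≠ pvDiffWitnessOut_count_special_matrix_rows.2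
def Claim_exact_count_special_matrix_rows : Prop := ∀ (n : Int) (t : Int), Dom_count_special_matrix_rows n t → D_count_special_matrix_rows n t → count_special_matrix_rows n t ≠ count_special_matrix_rows_alt n t

-- ===== LEMMAS AND PROOFS =====

-- ---- A's comb computes the binomial coefficient ----

theorem combStepA (n i : Int) (hn : 0 ≤ n) (hi : 1 ≤ i) (hin : i ≤ n) :
    PySem.Int.floordiv ((n.toNat.choose (i - 1).toNat : Int) * (n + 1 - i)) i
      = (n.toNat.choose i.toNat : Int) := by
  have hchoose : n.toNat.choose (i.toNat - 1) * (n.toNat + 1 - i.toNat)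
      = n.toNat.choose i.toNat * i.toNat := by
    have h := Nat.choose_succ_right_eq n.toNat (i.toNat - 1)
    have e1 : i.toNat - 1 + 1 = i.toNat := by omega
    rw [e1] at h
    have e2 : n.toNat - (i.toNat - 1) = n.toNat + 1 - i.toNat := by omega
    rw [e2] at h
    omega
  have harg : (n.toNat.choose (i - 1).toNat : Int) * (n + 1 - i)
      = (n.toNat.choose i.toNat : Int) * i := by
    have e1 : (i - 1).toNat = i.toNat - 1 := by omega
    have e2 : n + 1 - i = ((n.toNat + 1 - i.toNat : Nat) : Int) := by omega
    have e3 : ((i.toNat : Nat) : Int) = i := by omega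
    rw [e1, e2, ← e3, ← Nat.cast_mul, ← Nat.cast_mul]
    exact_mod_cast hchoose
  rw [harg, PySem.Int.floordiv_eq_ediv_of_pos (by omega)]
  exact Int.mul_ediv_cancel _ (by omega)

theorem pvCombLoopA_choose (n i r : Int) (hn : 0 ≤ n) (h1 : 1 ≤ i) (h2 : i ≤ r + 1)
    (h3 : r ≤ n) :
    pvCombLoopA n i r ((n.toNat.choose (i - 1).toNat : Int)) = (n.toNat.choose r.toNat : Int) := by
  rw [pvCombLoopA]
  split
  case isTrue h =>
    rw [combStepA n i hn h1 (by omega)]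
    have hrec := pvCombLoopA_choose n (i + 1) r hn (by omega) (by omega) h3
    have e : (i + 1 - 1).toNat = i.toNat := by omega
    rw [e] at hrec
    exact hrec
  case isFalse h =>
    have e : (i - 1).toNat = r.toNat := by omega
    rw [e]
termination_by (r + 1 - i).toNat
decreasing_by omega

theorem pvCombA_choose (m r : Int) (hm : 0 ≤ m) :
    pvCombA m r = if 0 ≤ r ∧ r ≤ m then (m.toNat.choose r.toNat : Int) else 0 := by
  unfold pvCombA
  by_cases hbad : r > m ∨ r < 0
  · rw [if_pos hbad, if_neg (by omega)]
  · rw [if_neg hbad, if_pos (by omega)]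
    have hA := pvCombLoopA_choose m 1 (min r (m - r)) hm (by omega) (by omega) (by omega)
    norm_num at hA
    rw [hA]
    by_cases hmin : r ≤ m - r
    · rw [min_eq_left hmin]
    · rw [min_eq_right (by omega)]
      have e : (m - r).toNat = m.toNat - r.toNat := by omega
      rw [e]
      exact_mod_cast Nat.choose_symm (by omega : r.toNat ≤ m.toNat)

theorem pvCombA_nonneg (m r : Int) (hm : 0 ≤ m) : 0 ≤ pvCombA m r := by
  rw [pvCombA_choose m r hm]
  split <;> positivity

theorem pvCombA_one (m : Int) (hm : 1 ≤ m) : pvCombA m 1 = m := by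
  rw [pvCombA_choose m 1 (by omega), if_pos (by omega)]
  have : (1 : Int).toNat = 1 := rfl
  rw [this, Nat.choose_one_right]
  omega

-- ---- basic facts about shifts and bit lengths ----

theorem one_shl_pos (m : Nat) : (1 : Int) ≤ (1 : Int) <<< m := by
  rw [Int.shiftLeft_eq, one_mul]
  exact one_le_pow₀ (by norm_num)

theorem one_shl_eq_pow (m : Nat) : (1 : Int) <<< m = ((2 ^ m : Nat) : Int) := by
  rw [Int.shiftLeft_eq, one_mul]
  push_cast
  rfl

theorem bitLength_pos (x : Int) (hx : x ≠ 0) : 1 ≤ PySem.Int.bitLength x := by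
  by_contra hc
  have h0 : PySem.Int.bitLength x = 0 := by omega
  have := PySem.Int.lt_two_pow_bitLength x
  rw [h0] at this
  simp at this
  omega

-- ---- Int-level bit reading reduced to Nat ----

theorem int_land_one (m i : Nat) :
    Int.land ((m : Int) >>> i) 1 = (((m >>> i) % 2 : Nat) : Int) := by
  have h : ((m : Int) >>> i) = ((m >>> i : Nat) : Int) := by simp
  rw [h, ← Nat.and_one_is_mod]
  rfl

theorem int_land_one' (N : Int) (h : 0 ≤ N) (i : Nat) :
    Int.land (N >>> i) 1 = (((N.toNat >>> i) % 2 : Nat) : Int) := by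
  cases N with
  | ofNat m => simpa using int_land_one m i
  | negSucc m => omega

-- ---- the scan with a correct triangle, rewritten to bare binomials ----

def scanC (N : Int) (k : Int) : List Nat → Int × Int → Int × Int
  | [], st => st
  | i :: rest, st =>
      if Int.land (N >>> i) 1 = 1 then
        scanC N k rest
          (st.1 + (if 0 ≤ k - st.2 ∧ k - st.2 ≤ (i : Int)
                   then ((i.choose (k - st.2).toNat : Nat) : Int) else 0),
           st.2 + 1)
      else scanC N k rest st

def pvRowFn (i : Nat) : List Int := (List.range (i + 1)).map (fun j => ((i.choose j : Nat) : Int))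

theorem rowFn_getD (i j : Nat) (hj : j ≤ i) : (pvRowFn i).getD j 0 = ((i.choose j : Nat) : Int) := by
  unfold pvRowFn
  rw [List.getD_eq_getElem?_getD]
  simp [Nat.lt_succ_of_le hj]

theorem pvTri_succ (L : Nat) (hL : 1 ≤ L) :
    pvTri (L + 1) = pvTri L ++ [pvPascalRow ((pvTri L).getLastD []) L] := by
  unfold pvTri
  have e : (List.range (L + 1)).drop 1 = (List.range L).drop 1 ++ [L] := by
    rw [List.range_succ, List.drop_append_of_le_length (by simpa using hL)]
  rw [e, List.foldl_append]
  rfl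

theorem pascalRow_step (M : Nat) :
    pvPascalRow (pvRowFn M) (M + 1) = pvRowFn (M + 1) := by
  unfold pvPascalRow
  have e1 : M + 1 - 1 = M := rfl
  rw [e1]
  have lhsmid : (List.range M).map (fun j => (pvRowFn M).getD j 0 + (pvRowFn M).getD (j + 1) 0)
      = (List.range M).map (fun j => (((M + 1).choose (j + 1) : Nat) : Int)) := by
    apply List.map_congr_left
    intro j hj
    rw [List.mem_range] at hj
    rw [rowFn_getD M j (by omega), rowFn_getD M (j + 1) (by omega),
      Nat.choose_succ_succ M j]
    push_cast
    ring
  rw [lhsmid]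
  unfold pvRowFn
  rw [List.range_succ_eq_map, List.map_cons, List.map_map]
  have e2 : List.map ((fun j => (((M + 1).choose j : Nat) : Int)) ∘ Nat.succ)
      (List.range (M + 1))
      = List.map (fun j => (((M + 1).choose (j + 1) : Nat) : Int)) (List.range (M + 1)) := by
    apply List.map_congr_left
    intro j hj
    simp
  rw [e2, List.range_succ, List.map_append]
  simp [Nat.choose_self]

theorem pvTri_eq (L : Nat) : pvTri L = (List.range (max L 1)).map pvRowFn := by
  induction L with
  | zero =>
      show pvTri 0 = [pvRowFn 0]
      unfold pvTri pvRowFn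
      norm_num
  | succ L ih =>
      match L, ih with
      | 0, _ =>
          show pvTri 1 = [pvRowFn 0]
          unfold pvTri pvRowFn
          norm_num
      | M + 1, ih =>
          rw [pvTri_succ (M + 1) (by omega), ih]
          have hmax : max (M + 1) 1 = M + 1 := by omega
          rw [hmax]
          have hlast : ((List.range (M + 1)).map pvRowFn).getLastD [] = pvRowFn M := by
            rw [List.range_succ, List.map_append]
            simp
          rw [hlast, pascalRow_step]
          have hmax2 : max (M + 1 + 1) 1 = M + 2 := by omega
          simp [List.range_succ]

theorem tri_getD (L i j : Nat) (hi : i < max L 1) (hj : j ≤ i) :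
    ((pvTri L).getD i []).getD j 0 = ((i.choose j : Nat) : Int) := by
  rw [pvTri_eq]
  have h1 : ((List.range (max L 1)).map pvRowFn).getD i [] = pvRowFn i := by
    rw [List.getD_eq_getElem?_getD]
    simp [hi]
  rw [h1, rowFn_getD i j hj]

theorem scan_eq_scanC (N k : Int) (L : Nat) (idxs : List Nat)
    (h : ∀ i ∈ idxs, i < max L 1) (st : Int × Int) :
    pvScan N k (pvTri L) idxs st = scanC N k idxs st := by
  induction idxs generalizing st with
  | nil => rfl
  | cons i rest ih =>
      rw [pvScan, scanC]
      have hi := h i (by simp)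
      have hrest : ∀ j ∈ rest, j < max L 1 := fun j hj => h j (by simp [hj])
      split
      · rw [ih hrest]
        congr 2
        split
        case isTrue hin =>
          rw [tri_getD L i (k - st.2).toNat hi (by omega)]
        case isFalse hin => rfl
      · exact ih hrest _

theorem scanC_shift (N k c : Int) (idxs : List Nat) (total ones : Int) :
    scanC N k idxs (total + c, ones)
      = ((scanC N k idxs (total, ones)).1 + c, (scanC N k idxs (total, ones)).2) := by
  induction idxs generalizing total ones with
  | nil => rfl
  | cons i rest ih =>
      rw [scanC, scanC]
      split
      · simp only []
        rw [show total + c + (if 0 ≤ k - ones ∧ k - ones ≤ (i:Int) then ((i.choose (k-ones).toNat : Nat) : Int) else 0) = total + (if 0 ≤ k - ones ∧ k - ones ≤ (i:Int) then ((i.choose (k-ones).toNat : Nat) : Int) else 0) + c by ring]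
        exact ih _ _
      · exact ih _ _

theorem scanC_target (N k : Int) (idxs : List Nat) (total ones : Int) :
    scanC N k idxs (total, ones + 1)
      = ((scanC N (k - 1) idxs (total, ones)).1, (scanC N (k - 1) idxs (total, ones)).2 + 1) := by
  induction idxs generalizing total ones with
  | nil => rfl
  | cons i rest ih =>
      rw [scanC, scanC]
      split
      · simp only []
        have e : k - (ones + 1) = k - 1 - ones := by ring
        rw [e]
        exact ih _ _
      · exact ih _ _

theorem scanC_congr (N N' k : Int) (idxs : List Nat)
    (h : ∀ i ∈ idxs, Int.land (N >>> i) 1 = Int.land (N' >>> i) 1) (st : Int × Int) :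
    scanC N k idxs st = scanC N' k idxs st := by
  induction idxs generalizing st with
  | nil => rfl
  | cons i rest ih =>
      have hi := h i (by simp)
      have hrest : ∀ j ∈ rest, _ := fun j hj => h j (by simp [hj])
      rw [scanC, scanC, hi]
      split
      · exact ih hrest _
      · exact ih hrest _

theorem scanC_zeros (N k : Int) (pre rest : List Nat)
    (h : ∀ i ∈ pre, ¬ Int.land (N >>> i) 1 = 1) (st : Int × Int) :
    scanC N k (pre ++ rest) st = scanC N k rest st := by
  induction pre generalizing st with
  | nil => rfl
  | cons i prefix' ih =>
      have hi := h i (by simp)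
      have hpre : ∀ j ∈ prefix', _ := fun j hj => h j (by simp [hj])
      rw [List.cons_append, scanC, if_neg hi]
      exact ih hpre _

theorem scanC_neg (N k : Int) (idxs : List Nat) (total ones : Int) (hk : k < ones) :
    (scanC N k idxs (total, ones)).1 = total ∧ ones ≤ (scanC N k idxs (total, ones)).2 := by
  induction idxs generalizing total ones with
  | nil => exact ⟨rfl, le_refl _⟩
  | cons i rest ih =>
      rw [scanC]
      split
      · simp only []
        rw [if_neg (by omega), add_zero]
        have := ih total (ones + 1) (by omega)
        exact ⟨this.1, by omega⟩
      · exact ih total ones hk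

-- ---- bit facts for the main induction ----

theorem pvShiftSubLt (x : Int) (h2 : 2 ≤ x) :
    (x - ((1 : Int) <<< (PySem.Int.bitLength x - 1))).toNat < x.toNat := by
  have hle : (2 : Nat) ^ (PySem.Int.bitLength x - 1) ≤ x.natAbs :=
    PySem.Int.two_pow_bitLength_le x (by omega)
  have hsh := one_shl_eq_pow (PySem.Int.bitLength x - 1)
  have hpos : (1 : Int) ≤ (((2 : Nat) ^ (PySem.Int.bitLength x - 1) : Nat) : Int) := by
    exact_mod_cast Nat.one_le_two_pow
  have h' : (((2 : Nat) ^ (PySem.Int.bitLength x - 1) : Nat) : Int) ≤ (x.natAbs : Int) := by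
    exact_mod_cast hle
  rw [hsh]
  omega

theorem shiftSub_nonneg (x : Int) (h2 : 2 ≤ x) :
    0 ≤ x - ((1 : Int) <<< (PySem.Int.bitLength x - 1)) := by
  have hle : (2 : Nat) ^ (PySem.Int.bitLength x - 1) ≤ x.natAbs :=
    PySem.Int.two_pow_bitLength_le x (by omega)
  have hsh := one_shl_eq_pow (PySem.Int.bitLength x - 1)
  have h' : (((2 : Nat) ^ (PySem.Int.bitLength x - 1) : Nat) : Int) ≤ (x.natAbs : Int) := by
    exact_mod_cast hle
  rw [hsh]
  omega


theorem bit_top (N : Int) (h1 : 1 ≤ N) :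
    Int.land (N >>> (PySem.Int.bitLength N - 1)) 1 = 1 := by
  have hub : N.toNat < 2 ^ PySem.Int.bitLength N := by
    have := PySem.Int.lt_two_pow_bitLength N
    omega
  have hlb : 2 ^ (PySem.Int.bitLength N - 1) ≤ N.toNat := by
    have := PySem.Int.two_pow_bitLength_le N (by omega)
    omega
  rw [int_land_one' N (by omega)]
  have hp : 0 < 2 ^ (PySem.Int.bitLength N - 1) := pow_pos (by norm_num) _
  have hdiv : N.toNat >>> (PySem.Int.bitLength N - 1) = 1 := by
    rw [Nat.shiftRight_eq_div_pow]
    have hone : 1 ≤ N.toNat / 2 ^ (PySem.Int.bitLength N - 1) :=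
      (Nat.one_le_div_iff hp).mpr hlb
    have htwo : N.toNat / 2 ^ (PySem.Int.bitLength N - 1) < 2 := by
      rw [Nat.div_lt_iff_lt_mul hp]
      have e : 2 ^ PySem.Int.bitLength N = 2 ^ (PySem.Int.bitLength N - 1) * 2 := by
        rw [← pow_succ]
        congr 1
        have := bitLength_pos N (by omega)
        omega
      omega
    omega
  rw [hdiv]
  norm_num

theorem bit_low (N : Int) (h2 : 2 ≤ N) (i : Nat) (hi : i < PySem.Int.bitLength N - 1) :
    Int.land (N >>> i) 1
      = Int.land ((N - ((1 : Int) <<< (PySem.Int.bitLength N - 1))) >>> i) 1 := by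
  have hub : N.toNat < 2 ^ PySem.Int.bitLength N := by
    have := PySem.Int.lt_two_pow_bitLength N
    omega
  have hlb : 2 ^ (PySem.Int.bitLength N - 1) ≤ N.toNat := by
    have := PySem.Int.two_pow_bitLength_le N (by omega)
    omega
  have hnn : 0 ≤ N - ((1 : Int) <<< (PySem.Int.bitLength N - 1)) := shiftSub_nonneg N h2
  rw [int_land_one' N (by omega), int_land_one' _ hnn]
  have hw : (N - ((1 : Int) <<< (PySem.Int.bitLength N - 1))).toNat
      = N.toNat - 2 ^ (PySem.Int.bitLength N - 1) := by
    have := one_shl_eq_pow (PySem.Int.bitLength N - 1)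
    omega
  rw [hw]
  congr 1
  have hsplit : 2 ^ (PySem.Int.bitLength N - 1)
      = 2 ^ (PySem.Int.bitLength N - 1 - i) * 2 ^ i := by
    rw [← pow_add]
    congr 1
    omega
  have hq : 2 ^ (PySem.Int.bitLength N - 1 - i)
      = 2 * 2 ^ (PySem.Int.bitLength N - 1 - i - 1) := by
    rw [← pow_succ']
    congr 1
    omega
  have hvw : N.toNat = (N.toNat - 2 ^ (PySem.Int.bitLength N - 1))
      + 2 ^ (PySem.Int.bitLength N - 1 - i) * 2 ^ i := by
    rw [← hsplit]
    omega
  rw [Nat.shiftRight_eq_div_pow, Nat.shiftRight_eq_div_pow]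
  conv_lhs => rw [hvw]
  rw [Nat.add_mul_div_right _ _ (pow_pos (by norm_num : 0 < 2) i)]
  omega

theorem bit_high_zero (N : Int) (h0 : 0 ≤ N) (i : Nat) (hi : PySem.Int.bitLength N ≤ i) :
    ¬ Int.land (N >>> i) 1 = 1 := by
  have hub : N.toNat < 2 ^ PySem.Int.bitLength N := by
    have := PySem.Int.lt_two_pow_bitLength N
    omega
  have hlt : N.toNat < 2 ^ i :=
    lt_of_lt_of_le hub (Nat.pow_le_pow_right (by norm_num) hi)
  rw [int_land_one' N h0, Nat.shiftRight_eq_div_pow, Nat.div_eq_of_lt hlt]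
  norm_num

-- ---- the core value of B's pass, and the main equivalence with A's F ----

def gC (N : Int) (k : Int) : Int :=
  (scanC N k ((List.range (PySem.Int.bitLength N)).reverse) (0, 0)).1
    + (if (scanC N k ((List.range (PySem.Int.bitLength N)).reverse) (0, 0)).2 = k then 1 else 0)

theorem gC_eq_pvF (N k : Int) (hN : 0 ≤ N) : gC N k = pvF N k := by
  by_cases h0 : N = 0
  · subst h0
    unfold gC
    rw [pvF]
    norm_num [PySem.Int.bitLength_zero, scanC]
    split_ifs <;> omega
  by_cases h1 : N = 1
  · subst h1
    unfold gC
    have hbl : PySem.Int.bitLength 1 = 1 := by decide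
    rw [hbl, pvF]
    have hland : Int.land (1 : Int) 1 = 1 := by decide
    simp only [List.range_one, List.reverse_singleton, scanC]
    norm_num [hland]
    by_cases hk : k = 0
    · subst hk
      norm_num
    · split_ifs <;> omega
  -- N ≥ 2
  have h2 : 2 ≤ N := by omega
  have hL2 : 2 ≤ PySem.Int.bitLength N := by
    by_contra hc
    have hub := PySem.Int.lt_two_pow_bitLength N
    interval_cases h : PySem.Int.bitLength N <;> simp_all <;> omega
  have hm : PySem.Int.bitLength N - 1 + 1 = PySem.Int.bitLength N := by omega
  have hrange : (List.range (PySem.Int.bitLength N)).reverse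
      = (PySem.Int.bitLength N - 1) :: (List.range (PySem.Int.bitLength N - 1)).reverse := by
    rw [← hm, List.range_succ, List.reverse_append]
    rfl
  have hN' : 0 ≤ N - ((1 : Int) <<< (PySem.Int.bitLength N - 1)) := shiftSub_nonneg N h2
  have hL'le : PySem.Int.bitLength (N - ((1 : Int) <<< (PySem.Int.bitLength N - 1)))
      ≤ PySem.Int.bitLength N - 1 := by
    by_cases hz : N - ((1 : Int) <<< (PySem.Int.bitLength N - 1)) = 0
    · rw [hz]
      simp [PySem.Int.bitLength_zero]
    · have hlow := PySem.Int.two_pow_bitLength_le _ hz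
      have hup := PySem.Int.lt_two_pow_bitLength N
      have hsh := one_shl_eq_pow (PySem.Int.bitLength N - 1)
      have habs : (N - ((1 : Int) <<< (PySem.Int.bitLength N - 1))).natAbs
          < 2 ^ (PySem.Int.bitLength N - 1) := by
        have e : 2 ^ PySem.Int.bitLength N = 2 ^ (PySem.Int.bitLength N - 1) * 2 := by
          rw [← pow_succ]
          congr 1
          omega
        omega
      have := lt_of_le_of_lt hlow habs
      have := (Nat.pow_lt_pow_iff_right (a := 2) (by norm_num)).mp this
      omega
  unfold gC
  rw [hrange, scanC, if_pos (by simpa using bit_top N (by omega))]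
  simp only []
  rw [scanC_target, scanC_shift,
    scanC_congr N (N - ((1 : Int) <<< (PySem.Int.bitLength N - 1))) (k - 1)
      ((List.range (PySem.Int.bitLength N - 1)).reverse)
      (fun i hi => bit_low N h2 i (by simpa using hi))]
  have hsplit : (List.range (PySem.Int.bitLength N - 1)).reverse
      = ((List.range (PySem.Int.bitLength N - 1
            - PySem.Int.bitLength (N - ((1 : Int) <<< (PySem.Int.bitLength N - 1))))).map
          (PySem.Int.bitLength (N - ((1 : Int) <<< (PySem.Int.bitLength N - 1))) + ·)).reverse
        ++ (List.range (PySem.Int.bitLength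
            (N - ((1 : Int) <<< (PySem.Int.bitLength N - 1))))).reverse := by
    conv_lhs => rw [show PySem.Int.bitLength N - 1
      = PySem.Int.bitLength (N - ((1 : Int) <<< (PySem.Int.bitLength N - 1)))
        + (PySem.Int.bitLength N - 1
            - PySem.Int.bitLength (N - ((1 : Int) <<< (PySem.Int.bitLength N - 1)))) from by
      omega]
    rw [List.range_add, List.reverse_append]
  rw [hsplit, scanC_zeros _ _ _ _ (by
    intro i hi
    simp only [List.mem_reverse, List.mem_map, List.mem_range] at hi
    obtain ⟨x, _, hx⟩ := hi
    exact bit_high_zero _ hN' i (by omega))]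
  have IH := gC_eq_pvF (N - ((1 : Int) <<< (PySem.Int.bitLength N - 1))) (k - 1) hN'
  unfold gC at IH
  set s := scanC (N - ((1 : Int) <<< (PySem.Int.bitLength N - 1))) (k - 1)
      ((List.range (PySem.Int.bitLength
        (N - ((1 : Int) <<< (PySem.Int.bitLength N - 1))))).reverse) (0, 0) with hs
  rw [pvF, if_neg h0, if_neg h1]
  by_cases hk0 : k = 0
  · subst hk0
    rw [if_pos rfl]
    have hneg := scanC_neg (N - ((1 : Int) <<< (PySem.Int.bitLength N - 1))) (0 - 1)
      ((List.range (PySem.Int.bitLength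
        (N - ((1 : Int) <<< (PySem.Int.bitLength N - 1))))).reverse) 0 0 (by omega)
    rw [← hs] at hneg
    rw [if_pos (by
      constructor
      · omega
      · have : (0 : Int) ≤ ((PySem.Int.bitLength N - 1 : Nat) : Int) := by positivity
        omega)]
    rw [if_neg (by omega : ¬ s.2 + 1 = (0 : Int))]
    norm_num
    omega
  rw [if_neg hk0]
  by_cases hkneg : k < 0
  · rw [dif_pos hkneg]
    have hneg := scanC_neg (N - ((1 : Int) <<< (PySem.Int.bitLength N - 1))) (k - 1)
      ((List.range (PySem.Int.bitLength
        (N - ((1 : Int) <<< (PySem.Int.bitLength N - 1))))).reverse) 0 0 (by omega)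
    rw [← hs] at hneg
    rw [if_neg (by omega : ¬ (0 ≤ k - 0 ∧ k - 0 ≤ ((PySem.Int.bitLength N - 1 : Nat) : Int))),
      if_neg (by omega : ¬ s.2 + 1 = k)]
    omega
  · rw [dif_neg hkneg]
    have hp3 : pyBinLenSub3 N = ((PySem.Int.bitLength N : Nat) : Int) - 1 := by
      unfold pyBinLenSub3
      rw [if_pos (by omega : (0 : Int) < N)]
    have hp3t : (pyBinLenSub3 N).toNat = PySem.Int.bitLength N - 1 := by
      rw [hp3]
      omega
    rw [hp3t, hp3, ← IH]
    have hcomb := pvCombA_choose (((PySem.Int.bitLength N : Nat) : Int) - 1) k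
      (by have : (1 : Nat) ≤ PySem.Int.bitLength N := by omega
          omega)
    rw [hcomb]
    have hcast : (((PySem.Int.bitLength N : Nat) : Int) - 1).toNat
        = PySem.Int.bitLength N - 1 := by omega
    have hcast2 : ((PySem.Int.bitLength N - 1 : Nat) : Int)
        = ((PySem.Int.bitLength N : Nat) : Int) - 1 := by omega
    rw [hcast]
    rw [show (if s.2 + 1 = k then (1 : Int) else 0) = (if s.2 = k - 1 then 1 else 0) by
      split_ifs <;> omega]
    simp only [sub_zero, hcast2]
    ring
termination_by N.toNat
decreasing_by exact pvShiftSubLt N (by omega)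

-- ---- entry-point reductions ----

theorem a_entry (n t : Int) (ht : 0 < t) (hp : t = (1 : Int) <<< (PySem.Int.bitLength t - 1)) :
    count_special_matrix_rows n t
      = pvF (n + 1) ((PySem.Int.bitLength t : Int)) - (if t = 1 then 1 else 0) := by
  unfold count_special_matrix_rows
  have hblt : 1 ≤ PySem.Int.bitLength t := bitLength_pos t (by omega)
  have hp3 : pyBinLenSub3 t = ((PySem.Int.bitLength t : Nat) : Int) - 1 := by
    unfold pyBinLenSub3
    rw [if_pos ht]
  have hp3t : (pyBinLenSub3 t).toNat = PySem.Int.bitLength t - 1 := by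
    rw [hp3]
    omega
  rw [hp3t, if_neg (not_ne_iff.mpr hp.symm), hp3,
    show ((PySem.Int.bitLength t : Nat) : Int) - 1 + 1 = ((PySem.Int.bitLength t : Nat) : Int)
      from by ring]

theorem alt_entry (n t : Int) (ht : 0 < t) (hp : t = (1 : Int) <<< (PySem.Int.bitLength t - 1))
    (hn : 0 ≤ n) :
    count_special_matrix_rows_alt n t
      = gC (n + 1) ((PySem.Int.bitLength t : Int)) - (if t = 1 then 1 else 0) := by
  unfold count_special_matrix_rows_alt gC
  rw [if_neg (by push_neg; exact ⟨by omega, hp⟩), if_neg (by omega : ¬ n < 0)]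
  simp only []
  rw [scan_eq_scanC (n + 1) ((PySem.Int.bitLength t : Nat) : Int) (PySem.Int.bitLength (n + 1))
    ((List.range (PySem.Int.bitLength (n + 1))).reverse)
    (fun i hi => by
      simp only [List.mem_reverse, List.mem_range] at hi
      omega) (0, 0)]

theorem pvF_neg (kk : Nat) : ∀ (k x : Int), k.toNat = kk → x < 0 → 1 ≤ k → 2 ≤ pvF x k := by
  induction kk using Nat.strong_induction_on with
  | _ kk IH =>
    intro k x hkk hx hk
    rw [pvF, if_neg (by omega), if_neg (by omega), if_neg (by omega), dif_neg (by omega)]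
    have hblx : 1 ≤ PySem.Int.bitLength x := bitLength_pos x (by omega)
    have hp3 : pyBinLenSub3 x = ((PySem.Int.bitLength x : Nat) : Int) := by
      unfold pyBinLenSub3
      rw [if_neg (by omega), if_neg (by omega)]
    rw [hp3, show (((PySem.Int.bitLength x : Nat) : Int)).toNat = PySem.Int.bitLength x from by
      omega]
    have hxneg : x - ((1 : Int) <<< PySem.Int.bitLength x) < 0 := by
      have := one_shl_pos (PySem.Int.bitLength x)
      omega
    by_cases hk1 : k = 1
    · subst hk1
      have h0 : pvF (x - ((1 : Int) <<< PySem.Int.bitLength x)) 0 = 1 := by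
        rw [pvF]
        norm_num
      rw [show (1 : Int) - 1 = 0 by norm_num, h0, pvCombA_one ((PySem.Int.bitLength x : Nat) : Int) (by exact_mod_cast hblx)]
      omega
    · have hrec := IH (kk - 1) (by omega) (k - 1) (x - ((1 : Int) <<< PySem.Int.bitLength x))
        (by omega) hxneg (by omega)
      have hcnn := pvCombA_nonneg ((PySem.Int.bitLength x : Nat) : Int) k (by positivity)
      omega

-- ===== VERDICT (by name: the statement is the Claim_ definition above) =====
theorem count_special_matrix_rows_spec : Claim_unchanged_count_special_matrix_rows := by
  intro n t hdom hnd
  show count_special_matrix_rows n t = count_special_matrix_rows_alt n t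
  by_cases hguard : 0 < t ∧ t = (1 : Int) <<< (PySem.Int.bitLength t - 1)
  · obtain ⟨ht, hp⟩ := hguard
    by_cases hn : 0 ≤ n
    · rw [a_entry n t ht hp, alt_entry n t ht hp hn, gC_eq_pvF _ _ (by omega)]
    · have hD : ¬ (n ≤ -2 ∨ (n = -1 ∧ t = 1)) := fun h => hnd ⟨⟨ht, hp⟩, h⟩
      push_neg at hD
      have hn1 : n = -1 := by omega
      have ht1 : t ≠ 1 := hD.2 hn1
      have hblt : 1 ≤ PySem.Int.bitLength t := bitLength_pos t (by omega)
      rw [a_entry n t ht hp]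
      subst hn1
      have hF : pvF (-1 + 1) ((PySem.Int.bitLength t : Nat) : Int) = 0 := by
        norm_num
        rw [pvF, if_neg (by omega : ¬ ((PySem.Int.bitLength t : Nat) : Int) = 0), if_pos rfl]
      rw [hF, if_neg ht1]
      unfold count_special_matrix_rows_alt
      rw [if_neg (by push_neg; exact ⟨by omega, hp⟩), if_pos (by omega : (-1 : Int) < 0)]
      norm_num
  · unfold count_special_matrix_rows count_special_matrix_rows_alt
    have hAg : ((1 : Int) <<< (pyBinLenSub3 t).toNat) ≠ t := by
      by_cases ht : 0 < t
      · have hne : t ≠ (1 : Int) <<< (PySem.Int.bitLength t - 1) := fun he => hguard ⟨ht, he⟩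
        have hblt : 1 ≤ PySem.Int.bitLength t := bitLength_pos t (by omega)
        have hp3t : (pyBinLenSub3 t).toNat = PySem.Int.bitLength t - 1 := by
          unfold pyBinLenSub3
          rw [if_pos ht]
          omega
        rw [hp3t]
        exact fun he => hne he.symm
      · have := one_shl_pos (pyBinLenSub3 t).toNat
        omega
    rw [if_pos hAg, if_pos (by
      by_cases ht : 0 < t
      · exact Or.inr (fun he => hguard ⟨ht, he⟩)
      · exact Or.inl (by omega))]

theorem count_special_matrix_rows_changed : Claim_changed_count_special_matrix_rows := by
  unfold Claim_changed_count_special_matrix_rows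
  refine ⟨by decide, by decide, ?_, by decide, by decide⟩
  show count_special_matrix_rows (-2) 1 = 1
  unfold count_special_matrix_rows
  rw [if_neg (by decide : ¬ ((1 : Int) <<< (pyBinLenSub3 1).toNat ≠ 1))]
  have h1 : pyBinLenSub3 1 = 0 := by decide
  have h2 : pyBinLenSub3 (-1) = 1 := by decide
  rw [h1]
  norm_num
  have hF : pvF (-1) 1 = 2 := by
    rw [pvF, if_neg (by norm_num), if_neg (by norm_num), if_neg (by norm_num),
      dif_neg (by norm_num), h2]
    have hF0 : pvF (-1 - (1 : Int) <<< (1 : Int).toNat) 0 = 1 := by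
      rw [pvF]
      norm_num
    rw [show (1 : Int) - 1 = 0 by norm_num, hF0, pvCombA_choose 1 1 (by norm_num), if_pos (by norm_num)]
    norm_num
  rw [hF]
  norm_num

theorem count_special_matrix_rows_tight : Claim_exact_count_special_matrix_rows := by
  intro n t hdom hD
  obtain ⟨⟨ht, hp⟩, hcase⟩ := hD
  have hn0 : n < 0 := by
    rcases hcase with h | ⟨h, _⟩ <;> omega
  have hblt : 1 ≤ PySem.Int.bitLength t := bitLength_pos t (by omega)
  have halt : count_special_matrix_rows_alt n t = 0 := by
    unfold count_special_matrix_rows_alt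
    rw [if_neg (by push_neg; exact ⟨by omega, hp⟩), if_pos hn0]
  rw [halt, a_entry n t ht hp]
  rcases hcase with hc | hc
  · have hF := pvF_neg (((PySem.Int.bitLength t : Nat) : Int)).toNat
      ((PySem.Int.bitLength t : Nat) : Int) (n + 1) rfl (by omega) (by exact_mod_cast hblt)
    split_ifs <;> omega
  · obtain ⟨hn1, ht1⟩ := hc
    subst hn1
    subst ht1
    have hbl1 : PySem.Int.bitLength (1 : Int) = 1 := by decide
    rw [hbl1]
    have hF : pvF (-1 + 1) ((1 : Nat) : Int) = 0 := by
      norm_num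
      rw [pvF]
      norm_num
    rw [hF]
    norm_num
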